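-- pv_equiv track=rewrite | github.com/pataluc/AoC | 2025/everybodyCodes/day13/ex.py | part1
-- ===== SOURCE A (Python) =====
-- from collections import deque
--
-- def part1(numbers: list) -> int:
--     wheel = deque([1])
--     for i, number in enumerate(numbers):
--         if i % 2 == 0:
--             wheel.append(number)
--         else:
--             wheel.appendleft(number)
--
--     while wheel[0] != 1:
--         number = wheel.popleft()
--         wheel.append(number)
--
--     result = wheel[2025 % len(wheel)]
--     return result
-- ===== SOURCE B (Python) =====
-- def part1(numbers: list) -> int:
--     # deque after the insert loop is reversed(odd-indexed) + [1] + even-indexed;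
--     # rotating until the front equals 1 lands on the FIRST 1, so index arithmetically.
--     d = numbers[1::2][::-1] + [1] + numbers[0::2]
--     return d[(d.index(1) + 2025) % len(d)]
-- ===== Notes on version B (the rewrite author's own statement) =====
-- stated objective: faster
-- what changed: B builds the final deque layout directly as reversed(odd-indexed)+[1]+even-indexed via C-level slicing and replaces A's element-by-element deque rotation loop with a single index() scan and one modular index computation.
import Mathlib
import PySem

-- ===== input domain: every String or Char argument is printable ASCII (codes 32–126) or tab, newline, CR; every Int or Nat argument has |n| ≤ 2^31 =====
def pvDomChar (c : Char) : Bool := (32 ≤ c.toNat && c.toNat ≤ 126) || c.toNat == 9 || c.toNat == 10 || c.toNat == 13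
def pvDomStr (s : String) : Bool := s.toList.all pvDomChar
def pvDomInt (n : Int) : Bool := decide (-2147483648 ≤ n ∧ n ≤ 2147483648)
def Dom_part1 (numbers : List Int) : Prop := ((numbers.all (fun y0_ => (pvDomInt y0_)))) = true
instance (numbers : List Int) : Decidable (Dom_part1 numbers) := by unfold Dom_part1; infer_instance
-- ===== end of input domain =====

-- B replaces A's element-by-element deque rotation and deque simulation with slicing plus a
-- direct modular index computation on the built list (objective: alternative/constant-factor).

-- ===== PORT A =====
-- the 'for i, number in enumerate(numbers)' loop: append right on even i, left on odd i
def buildWheel : Nat → List Int → List Int → List Int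
  | _, w, [] => w
  | i, w, x :: rest => buildWheel (i + 1) (if i % 2 = 0 then w ++ [x] else x :: w) rest

-- the 'while wheel[0] != 1: rotate' loop, with fuel = wheel.length; the wheel always
-- contains 1 at an index < length, so the fuel is never exhausted (rotLoop_rotate below)
def rotLoop : Nat → List Int → List Int
  | 0, w => w
  | f + 1, w =>
    match w with
    | [] => []
    | x :: rest => if x ≠ 1 then rotLoop f (rest ++ [x]) else x :: rest

def part1 (numbers : List Int) : Int :=
  let wheel := buildWheel 0 [1] numbers
  let wheel := rotLoop wheel.length wheel
  -- wheel[2025 % len(wheel)]: the index is always in range, so the getD default is never used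
  (PySem.List.pyGet? wheel (PySem.Int.mod 2025 (wheel.length : Int))).getD 0

-- ===== PORT B =====
-- Source B: d = numbers[1::2][::-1] + [1] + numbers[0::2]; return d[(d.index(1) + 2025) % len(d)]
def part1_alt (numbers : List Int) : Int :=
  let odds := (PySem.List.slice? numbers (some 1) none 2).getD []
  let d := (PySem.List.slice? odds none none (-1)).getD [] ++ [1] ++
           (PySem.List.slice? numbers (some 0) none 2).getD []
  -- d.index(1) never raises (1 ∈ d) and the final index is in range: the getD defaults are never used
  let k := ((PySem.List.index? d 1).getD 0 : Int)
  (PySem.List.pyGet? d (PySem.Int.mod (k + 2025) (d.length : Int))).getD 0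

-- ===== PRECONDITION & SPEC =====
def Spec_part1 (numbers : List Int) (out : Int) : Prop := out = part1_alt numbers
instance (numbers : List Int) (out : Int) : Decidable (Spec_part1 numbers out) := by unfold Spec_part1; infer_instance

-- ===== CLAIM (what is proved, stated in full; the proofs are below) =====
def Claim_equal_part1 : Prop := ∀ (numbers : List Int), Dom_part1 numbers → Spec_part1 numbers (part1 numbers)

-- ===== LEMMAS AND PROOFS =====

def sel : Bool → List Int → List Int
  | _, [] => []
  | true, x :: xs => x :: sel false xs
  | false, _ :: xs => sel true xs

theorem sel_getElem? (xs : List Int) : ∀ b k, (sel b xs)[k]? = xs[2 * k + cond b 0 1]? := by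
  induction xs with
  | nil => intro b k; cases b <;> simp [sel]
  | cons x xs ih =>
    intro b k
    cases b with
    | false =>
      have h : 2 * k + cond false 0 1 = (2 * k + cond true 0 1) + 1 := by simp
      rw [h]
      simp only [sel, List.getElem?_cons_succ]
      exact ih true k
    | true =>
      cases k with
      | zero => simp [sel]
      | succ k =>
        have h : 2 * (k + 1) + cond true 0 1 = (2 * k + cond false 0 1) + 1 := by
          simp; omega
        rw [h]
        simp only [sel, List.getElem?_cons_succ]
        exact ih false k

theorem slice_step2 (xs : List Int) (s : Nat) (hs1 : s ≤ 1) (hs : s ≤ xs.length) :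
    (PySem.List.slice? xs (some (s : Int)) none 2).getD [] = sel (s == 0) xs := by
  have hc : ∀ k, k < (xs.length - s + 1) / 2 → s + 2 * k < xs.length := by
    intro k hk; omega
  have step1 : (PySem.List.slice? xs (some (s : Int)) none 2).getD [] =
      (List.range ((xs.length - s + 1) / 2)).filterMap (fun k => xs[s + 2 * k]?) := by
    simp only [PySem.List.slice?, PySem.List.sliceIndices]
    norm_num
    have h0 : ¬ ((s : Int) < 0) := by omega
    simp only [if_neg h0]
    have hmin : min (s : Int) (xs.length : Int) = (s : Int) := by omega
    rw [hmin]
    by_cases hlt : (s : Int) < (xs.length : Int)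
    · rw [if_pos hlt]
      have h3 : ((xs.length : Int) - (s : Int) + 2 - 1) = ((xs.length - s + 1 : Nat) : Int) := by
        push_cast; omega
      rw [h3, show ((2:Int)) = ((2:Nat):Int) from rfl, ← Int.natCast_div, Int.toNat_natCast]
      congr 1
      all_goals (funext k; congr 1; omega)
    · rw [if_neg hlt]
      have h2 : (xs.length - s + 1) / 2 = 0 := by omega
      rw [h2]
      simp
  rw [step1]
  have step2 : (List.range ((xs.length - s + 1) / 2)).filterMap (fun k => xs[s + 2 * k]?) =
      (List.range ((xs.length - s + 1) / 2)).map (fun k => xs.getD (s + 2 * k) 0) := by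
    apply List.filterMap_eq_map_iff_forall_eq_some.mpr
    intro k hk
    have hklt := hc k (List.mem_range.mp hk)
    rw [List.getElem?_eq_getElem hklt, List.getD_eq_getElem xs 0 hklt]
  rw [step2]
  apply List.ext_getElem?
  intro j
  rw [sel_getElem?]
  have hb : 2 * j + cond (s == 0) 0 1 = s + 2 * j := by
    interval_cases s <;> simp <;> omega
  rw [hb]
  by_cases hj : j < (xs.length - s + 1) / 2
  · rw [List.getElem?_map, List.getElem?_range hj]
    have := hc j hj
    simp [List.getElem?_eq_getElem this, List.getD_eq_getElem xs 0 this]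
  · rw [List.getElem?_map, List.getElem?_eq_none (by simpa using hj)]
    rw [List.getElem?_eq_none (by omega)]
    rfl

theorem buildWheel_eq (xs : List Int) : ∀ (i : Nat) (w : List Int),
    buildWheel i w xs =
      (sel (!decide (i % 2 = 0)) xs).reverse ++ w ++ sel (decide (i % 2 = 0)) xs := by
  induction xs with
  | nil => intro i w; simp [buildWheel, sel]
  | cons x xs ih =>
    intro i w
    by_cases h : i % 2 = 0
    · have h' : ¬ (i + 1) % 2 = 0 := by omega
      simp only [buildWheel, if_pos h, ih (i + 1), h, h', decide_eq_true_eq, decide_eq_false_iff_not]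
      simp [sel, List.append_assoc]
    · have h' : (i + 1) % 2 = 0 := by omega
      simp only [buildWheel, if_neg h, ih (i + 1), h, h']
      simp [sel, h, h', List.append_assoc]

theorem rotLoop_rotate : ∀ (k : Nat) (w : List Int) (f : Nat), k ≤ f →
    (∀ j, j < k → w[j]? ≠ some 1) → w[k]? = some 1 → rotLoop f w = w.rotate k := by
  intro k
  induction k with
  | zero =>
    intro w f _ _ h0
    cases w with
    | nil => simp at h0
    | cons x rest =>
      simp only [List.getElem?_cons_zero, Option.some.injEq] at h0
      cases f with
      | zero => simp [rotLoop, List.rotate_zero]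
      | succ f => simp [rotLoop, h0, List.rotate_zero]
  | succ k ih =>
    intro w f hf hlt hk
    cases w with
    | nil => simp at hk
    | cons x rest =>
      have hx : x ≠ 1 := by
        have := hlt 0 (by omega)
        simpa using this
      obtain ⟨f', rfl⟩ : ∃ f', f = f' + 1 := ⟨f - 1, by omega⟩
      have hklen : k < rest.length := by
        have := List.getElem?_eq_some_iff.mp hk
        obtain ⟨h, _⟩ := this
        simpa using h
      have step : rotLoop (f' + 1) (x :: rest) = rotLoop f' (rest ++ [x]) := by
        simp [rotLoop, hx]
      rw [step, ih (rest ++ [x]) f' (by omega)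
        (fun j hj => by
          rw [List.getElem?_append_left (by omega)]
          have := hlt (j + 1) (by omega)
          simpa using this)
        (by
          rw [List.getElem?_append_left hklen]
          simpa using hk)]
      rw [List.rotate_cons_succ]

theorem part1_spec_aux (numbers : List Int) : part1 numbers = part1_alt numbers := by
  have hodds : (PySem.List.slice? numbers (some 1) none 2).getD [] = sel false numbers := by
    cases numbers with
    | nil => decide
    | cons x xs =>
      have := slice_step2 (x :: xs) 1 (le_refl 1) (by simp)
      simpa using this
  have hevens : (PySem.List.slice? numbers (some 0) none 2).getD [] = sel true numbers := by
    have := slice_step2 numbers 0 (by omega) (by omega)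
    simpa using this
  set d : List Int := (sel false numbers).reverse ++ [1] ++ sel true numbers with hd
  have hdB : (PySem.List.slice? ((PySem.List.slice? numbers (some 1) none 2).getD [])
        none none (-1)).getD [] ++ [1] ++
      (PySem.List.slice? numbers (some 0) none 2).getD [] = d := by
    rw [hodds, hevens, PySem.List.slice?_none_none_neg_one]
    rfl
  have hdA : buildWheel 0 [1] numbers = d := by
    rw [buildWheel_eq numbers 0 [1]]
    simp [sel, hd]
  -- first occurrence of 1 in d
  have hmem : (1 : Int) ∈ d := by simp [hd]
  obtain ⟨k, hk⟩ : ∃ k, PySem.List.index? d 1 = some k := by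
    have := PySem.List.index?_isSome_iff (xs := d) (v := (1:Int))
    rcases h : PySem.List.index? d 1 with _ | k
    · rw [h] at this; simp at this; exact absurd hmem (by simpa using this)
    · exact ⟨k, rfl⟩
  obtain ⟨hklt, hkval, hkfirst⟩ := PySem.List.getElem_of_index?_eq_some hk
  have hrot : rotLoop d.length d = d.rotate k := by
    apply rotLoop_rotate k d d.length (by omega)
    · intro j hj
      rw [List.getElem?_eq_getElem (by omega)]
      simp only [ne_eq, Option.some.injEq]
      exact hkfirst j hj
    · rw [List.getElem?_eq_getElem hklt]
      simp [hkval]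
  have hm : 0 < d.length := by simp [hd]
  -- compute both sides
  show (PySem.List.pyGet? (rotLoop (buildWheel 0 [1] numbers).length (buildWheel 0 [1] numbers))
      (PySem.Int.mod 2025 ((rotLoop (buildWheel 0 [1] numbers).length (buildWheel 0 [1] numbers)).length : Int))).getD 0 = _
  rw [hdA, hrot]
  have hlenrot : (d.rotate k).length = d.length := by simp
  have hmodA : PySem.Int.mod 2025 ((d.rotate k).length : Int) = ((2025 % d.length : Nat) : Int) := by
    rw [hlenrot]
    show Int.fmod 2025 (d.length : Int) = _
    rw [Int.fmod_eq_emod]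
    have : (2025 : Int) = ((2025 : Nat) : Int) := by norm_num
    rw [this, if_pos (Or.inl (by positivity)), ← Int.natCast_emod]
    simp
  rw [hmodA, PySem.List.pyGet?_natCast]
  have h2025 : 2025 % d.length < d.length := Nat.mod_lt _ hm
  rw [List.getElem?_rotate (by omega)]
  show _ = (PySem.List.pyGet? _ (PySem.Int.mod (((PySem.List.index? _ 1).getD 0 : Nat) + 2025) _)).getD 0
  rw [hdB, hk]
  have hmodB : PySem.Int.mod (((k : Nat) : Int) + 2025) (d.length : Int)
      = (((k + 2025) % d.length : Nat) : Int) := by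
    show Int.fmod _ _ = _
    rw [Int.fmod_eq_emod]
    have : ((k : Int) + 2025) = (((k + 2025 : Nat)) : Int) := by push_cast; ring
    rw [this, if_pos (Or.inl (by positivity)), ← Int.natCast_emod]
    simp
  simp only [Option.getD_some]
  rw [hmodB]
  rw [PySem.List.pyGet?_natCast]
  have hidx : (2025 % d.length + k) % d.length = (k + 2025) % d.length := by
    rw [Nat.mod_add_mod, Nat.add_comm]
  rw [hidx]

-- ===== VERDICT (by name: the statement is the Claim_ definition above) =====
theorem part1_spec : Claim_equal_part1 := by
  intro numbers _
  unfold Spec_part1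
  exact part1_spec_aux numbers
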